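-- pv_equiv track=rewrite | github.com/yuliaset/DeepRiichi | main.py | better_wait_count
-- ===== SOURCE A (Python) =====
-- def is_run(three_nums):
--     return (three_nums[1] == three_nums[0] + 1) and (three_nums[2] == three_nums[1] + 1)
--
-- def is_triplet2(three_nums):
--     return (three_nums[0] == three_nums[1]) and (three_nums[1] == three_nums[2])
--
-- def forms_meld(tiles_nums):
--     from itertools import combinations
--     if len(tiles_nums) < 3:
--         return False
--     for combo in combinations(tiles_nums, 3):
--         if is_run(sorted(combo)) or is_triplet2(combo):
--             return True
--     return False
--
-- def leftover_copies(tile_num, shape):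
--     return max(4 - shape.count(tile_num), 0)
--
-- def acceptance_of_tiles(shape):
--     total = 0
--     for t in range(1, 10):
--         if leftover_copies(t, shape) > 0:
--             if forms_meld(shape + [t]):
--                 total += leftover_copies(t, shape)
--     return total
--
-- def better_wait_count(shape):
--     original_acc = acceptance_of_tiles(shape)
--     improve_sum = 0
--     for t in range(1, 10):
--         if leftover_copies(t, shape) == 0:
--             continue
--         if forms_meld(shape + [t]):
--             continue
--         new_acc = acceptance_of_tiles(shape + [t])
--         if new_acc > original_acc:
--             improve_sum += leftover_copies(t, shape)
--     return improve_sum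
-- ===== SOURCE B (Python) =====
-- def better_wait_count(shape):
--     cnt = {}
--     for x in shape:
--         cnt[x] = cnt.get(x, 0) + 1
--
--     def has_meld(c):
--         for v, cv in c.items():
--             if cv >= 3:
--                 return True
--             if cv > 0 and c.get(v + 1, 0) > 0 and c.get(v + 2, 0) > 0:
--                 return True
--         return False
--
--     def bump(c, t):
--         c2 = dict(c)
--         c2[t] = c2.get(t, 0) + 1
--         return c2
--
--     def acceptance(c):
--         total = 0
--         for t in range(1, 10):
--             left = max(4 - c.get(t, 0), 0)
--             if left > 0 and has_meld(bump(c, t)):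
--                 total += left
--         return total
--
--     base = acceptance(cnt)
--     ans = 0
--     for t in range(1, 10):
--         left = max(4 - cnt.get(t, 0), 0)
--         if left > 0 and not has_meld(bump(cnt, t)) and acceptance(bump(cnt, t)) > base:
--             ans += left
--     return ans
-- ===== Notes on version B (the rewrite author's own statement) =====
-- stated objective: faster
-- what changed: B builds a value->count histogram once and decides meld existence by scanning the histogram for a count>=3 or three consecutive present values, instead of A's enumeration of all 3-combinations with a sort per combination.
import Mathlib
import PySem

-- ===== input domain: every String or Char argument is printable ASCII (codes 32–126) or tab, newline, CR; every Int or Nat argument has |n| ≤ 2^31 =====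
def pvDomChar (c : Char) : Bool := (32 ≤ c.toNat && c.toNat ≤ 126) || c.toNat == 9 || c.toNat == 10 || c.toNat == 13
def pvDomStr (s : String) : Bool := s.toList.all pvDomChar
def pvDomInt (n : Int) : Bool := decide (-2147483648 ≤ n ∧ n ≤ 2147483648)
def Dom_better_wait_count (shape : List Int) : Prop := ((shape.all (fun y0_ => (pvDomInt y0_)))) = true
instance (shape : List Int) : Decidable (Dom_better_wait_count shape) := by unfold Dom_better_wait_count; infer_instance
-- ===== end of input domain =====

-- B replaces A's O(n^3) combinations-based meld detection by a one-pass counter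
-- (histogram) check for a triplet or a run; equivalence of the two is proved below.

-- ===== PORT A =====

-- itertools.combinations(xs, 2) as ordered pairs
def pvPairs : List Int → List (Int × Int)
  | [] => []
  | x :: rest => rest.map (fun y => (x, y)) ++ pvPairs rest

-- itertools.combinations(xs, 3) as ordered triples
def pvCombos3 : List Int → List (Int × Int × Int)
  | [] => []
  | x :: rest => (pvPairs rest).map (fun p => (x, p.1, p.2)) ++ pvCombos3 rest

-- Python indexes three_nums[0..2]; every call site passes a 3-element list, so only
-- that pattern is reachable (hand port of the tuple indexing, exact there)
def is_run (three_nums : List Int) : Bool :=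
  match three_nums with
  | [a, b, c] => (b == a + 1) && (c == b + 1)
  | _ => false

def is_triplet2 (t : Int × Int × Int) : Bool := (t.1 == t.2.1) && (t.2.1 == t.2.2)

def forms_meld (tiles_nums : List Int) : Bool :=
  if tiles_nums.length < 3 then false
  else (pvCombos3 tiles_nums).any fun t =>
    is_run (PySem.List.sorted [t.1, t.2.1, t.2.2] (fun x => x) false) || is_triplet2 t

def leftover_copies (tile_num : Int) (shape : List Int) : Int :=
  max (4 - (shape.count tile_num : Int)) 0

def acceptance_of_tiles (shape : List Int) : Int :=
  (PySem.List.pyRange 1 10 1).foldl (fun total t =>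
    if 0 < leftover_copies t shape then
      if forms_meld (shape ++ [t]) then total + leftover_copies t shape else total
    else total) 0

def better_wait_count (shape : List Int) : Int :=
  let originalAcc := acceptance_of_tiles shape
  (PySem.List.pyRange 1 10 1).foldl (fun acc t =>
    if leftover_copies t shape = 0 then acc
    else if forms_meld (shape ++ [t]) then acc
    else if originalAcc < acceptance_of_tiles (shape ++ [t]) then acc + leftover_copies t shape
    else acc) 0

-- ===== PORT B =====

-- cnt[x] = cnt.get(x, 0) + 1 over shape
def bwcCounter (shape : List Int) : PySem.Dict Int Int :=
  shape.foldl (fun d x => d.insert x (d.getD x 0 + 1)) PySem.Dict.empty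

def hasMeld (c : PySem.Dict Int Int) : Bool :=
  c.items.any fun p =>
    decide (3 ≤ p.2) ||
      (decide (0 < p.2) && decide (0 < c.getD (p.1 + 1) 0) && decide (0 < c.getD (p.1 + 2) 0))

def bwcBump (c : PySem.Dict Int Int) (t : Int) : PySem.Dict Int Int :=
  c.insert t (c.getD t 0 + 1)

def bwcAcceptance (c : PySem.Dict Int Int) : Int :=
  (PySem.List.pyRange 1 10 1).foldl (fun total t =>
    let left := max (4 - c.getD t 0) 0
    if 0 < left ∧ hasMeld (bwcBump c t) then total + left else total) 0

def better_wait_count_alt (shape : List Int) : Int :=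
  let c := bwcCounter shape
  let base := bwcAcceptance c
  (PySem.List.pyRange 1 10 1).foldl (fun acc t =>
    let left := max (4 - c.getD t 0) 0
    if 0 < left ∧ ¬ hasMeld (bwcBump c t) ∧ base < bwcAcceptance (bwcBump c t)
    then acc + left else acc) 0

-- ===== PRECONDITION & SPEC =====
def Spec_better_wait_count (shape : List Int) (out : Int) : Prop := out = better_wait_count_alt shape
instance (shape : List Int) (out : Int) : Decidable (Spec_better_wait_count shape out) := by unfold Spec_better_wait_count; infer_instance

-- ===== CLAIM (what is proved, stated in full; the proofs are below) =====
def Claim_equal_better_wait_count : Prop := ∀ (shape : List Int), Dom_better_wait_count shape → Spec_better_wait_count shape (better_wait_count shape)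

-- ===== LEMMAS AND PROOFS =====

-- the meld property both meld tests decide: a triplet or a run somewhere in the tiles
def Meld (xs : List Int) : Prop :=
  (∃ v, 3 ≤ xs.count v) ∨ (∃ v, v ∈ xs ∧ v + 1 ∈ xs ∧ v + 2 ∈ xs)

theorem mem_pvPairs (b c : Int) (xs : List Int) :
    (b, c) ∈ pvPairs xs ↔ List.Sublist [b, c] xs := by
  induction xs with
  | nil => simp [pvPairs]
  | cons x rest ih =>
    rw [List.sublist_cons_iff]
    simp only [pvPairs, List.mem_append, List.mem_map, ih, Prod.mk.injEq]
    constructor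
    · rintro (⟨y, hy, rfl, rfl⟩ | h)
      · exact Or.inr ⟨_, rfl, List.singleton_sublist.mpr hy⟩
      · exact Or.inl h
    · rintro (h | ⟨r, heq, hr⟩)
      · exact Or.inr h
      · simp only [List.cons.injEq] at heq
        obtain ⟨rfl, rfl⟩ := heq
        exact Or.inl ⟨_, List.singleton_sublist.mp hr, rfl, rfl⟩

theorem mem_pvCombos3 (a b c : Int) (xs : List Int) :
    (a, b, c) ∈ pvCombos3 xs ↔ List.Sublist [a, b, c] xs := by
  induction xs with
  | nil => simp [pvCombos3]
  | cons x rest ih =>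
    rw [List.sublist_cons_iff]
    simp only [pvCombos3, List.mem_append, List.mem_map, ih, Prod.mk.injEq]
    constructor
    · rintro (⟨⟨p1, p2⟩, hp, rfl, rfl, rfl⟩ | h)
      · exact Or.inr ⟨_, rfl, (mem_pvPairs _ _ rest).mp hp⟩
      · exact Or.inl h
    · rintro (h | ⟨r, heq, hr⟩)
      · exact Or.inr h
      · simp only [List.cons.injEq] at heq
        obtain ⟨rfl, rfl⟩ := heq
        exact Or.inl ⟨_, (mem_pvPairs _ _ rest).mpr hr, rfl, rfl, rfl⟩

theorem forms_meld_iff (xs : List Int) : forms_meld xs = true ↔ Meld xs := by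
  unfold forms_meld
  constructor
  · intro h
    split at h
    · exact absurd h (by simp)
    · rw [List.any_eq_true] at h
      obtain ⟨⟨a, b, c⟩, hmem, hp⟩ := h
      have hsub := (mem_pvCombos3 a b c xs).mp hmem
      rw [Bool.or_eq_true] at hp
      rcases hp with hrun | htrip
      · have hperm : (PySem.List.sorted [a, b, c] (fun x => x) false).Perm [a, b, c] :=
          PySem.List.sorted_perm [a, b, c] (fun x => x) false
        have hlen3 : (PySem.List.sorted [a, b, c] (fun x => x) false).length = 3 := by
          rw [hperm.length_eq]; rfl
        rcases hS : PySem.List.sorted [a, b, c] (fun x => x) false with _ | ⟨u, _ | ⟨v, _ | ⟨w, _ | ⟨d, tl⟩⟩⟩⟩ <;>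
          rw [hS] at hlen3 hperm hrun <;> simp at hlen3
        simp only [is_run, Bool.and_eq_true, beq_iff_eq] at hrun
        obtain ⟨rfl, rfl⟩ := hrun
        have hsubset : ∀ y, y ∈ [u, u + 1, u + 1 + 1] → y ∈ xs := by
          intro y hy
          exact hsub.subset (hperm.subset hy)
        refine Or.inr ⟨u, hsubset u (by simp), hsubset (u + 1) (by simp), ?_⟩
        have := hsubset (u + 1 + 1) (by simp)
        rwa [show u + 1 + 1 = u + 2 by ring] at this
      · simp only [is_triplet2, Bool.and_eq_true, beq_iff_eq] at htrip
        obtain ⟨rfl, rfl⟩ := htrip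
        refine Or.inl ⟨a, ?_⟩
        have := hsub.count_le a
        simpa using this
  · intro hm
    have key : ∃ a b c, List.Sublist [a, b, c] xs ∧
        (is_run (PySem.List.sorted [a, b, c] (fun x => x) false) || is_triplet2 (a, b, c)) = true := by
      rcases hm with ⟨v, hv⟩ | ⟨v, h1, h2, h3⟩
      · refine ⟨v, v, v, ?_, ?_⟩
        · exact (List.replicate_sublist_iff (n := 3)).mpr hv
        · simp [is_triplet2]
      · have hsp : List.Subperm [v, v + 1, v + 2] xs := by
          rw [List.subperm_ext_iff]
          intro x hx
          have hx' : x = v ∨ x = v + 1 ∨ x = v + 2 := by simpa using hx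
          have hmem : x ∈ xs := by rcases hx' with rfl | rfl | rfl <;> assumption
          have hpos : 0 < xs.count x := List.count_pos_iff.mpr hmem
          have hone : List.count x [v, v + 1, v + 2] ≤ 1 := by
            rcases hx' with rfl | rfl | rfl <;> simp
          omega
        obtain ⟨l', hperm, hsubl⟩ := hsp
        have hlen3 : l'.length = 3 := by rw [hperm.length_eq]; rfl
        rcases l' with _ | ⟨a, _ | ⟨b, _ | ⟨c, _ | ⟨d, tl⟩⟩⟩⟩ <;> simp at hlen3
        refine ⟨a, b, c, hsubl, ?_⟩
        have hsorted : PySem.List.sorted [a, b, c] (fun x => x) false = [v, v + 1, v + 2] :=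
          PySem.List.sorted_eq_of_perm_of_pairwise_lt [a, b, c] [v, v + 1, v + 2] (fun x => x)
            hperm.symm (by simp)
        rw [hsorted]
        rw [Bool.or_eq_true]
        refine Or.inl ?_
        simp only [is_run, Bool.and_eq_true, beq_iff_eq]
        exact ⟨trivial, by ring⟩
    obtain ⟨a, b, c, hsub, hcond⟩ := key
    have hlen : ¬ xs.length < 3 := by
      have := hsub.length_le
      simp only [List.length_cons, List.length_nil] at this
      omega
    rw [if_neg hlen, List.any_eq_true]
    exact ⟨(a, b, c), (mem_pvCombos3 a b c xs).mpr hsub, hcond⟩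

theorem bwcCounter_getD (xs : List Int) (v : Int) :
    (bwcCounter xs).getD v 0 = xs.count v := by
  unfold bwcCounter
  rw [PySem.Dict.getD_foldl_insert_add_one]
  simp

theorem hasMeld_iff (xs : List Int) : hasMeld (bwcCounter xs) = true ↔ Meld xs := by
  unfold bwcCounter hasMeld
  rw [PySem.Dict.foldl_insert_getD_add_one_eq_counter, PySem.Dict.items_counter, List.any_map,
    List.any_eq_true]
  simp only [Function.comp, PySem.Dict.getD_counter, Bool.or_eq_true, Bool.and_eq_true,
    decide_eq_true_eq, PySem.Set.mem_ofList]
  constructor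
  · rintro ⟨v, hvmem, h3 | ⟨⟨hp, h1⟩, h2⟩⟩
    · exact Or.inl ⟨v, by exact_mod_cast h3⟩
    · refine Or.inr ⟨v, hvmem, List.count_pos_iff.mp (by exact_mod_cast h1),
        List.count_pos_iff.mp (by exact_mod_cast h2)⟩
  · rintro (⟨v, h3⟩ | ⟨v, h1, h2, h3⟩)
    · refine ⟨v, List.count_pos_iff.mp (by omega), Or.inl (by exact_mod_cast h3)⟩
    · refine ⟨v, h1, Or.inr ⟨⟨?_, ?_⟩, ?_⟩⟩ <;>
        exact_mod_cast Int.natCast_pos.mpr (List.count_pos_iff.mpr (by assumption))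

theorem meld_eq (xs : List Int) : forms_meld xs = hasMeld (bwcCounter xs) :=
  Bool.eq_iff_iff.mpr ((forms_meld_iff xs).trans (hasMeld_iff xs).symm)

theorem bwcBump_eq (xs : List Int) (t : Int) :
    bwcBump (bwcCounter xs) t = bwcCounter (xs ++ [t]) := by
  simp [bwcCounter, bwcBump, List.foldl_append]

theorem bwc_left_eq (xs : List Int) (t : Int) :
    max (4 - (bwcCounter xs).getD t 0) 0 = leftover_copies t xs := by
  rw [bwcCounter_getD]; rfl

theorem meld_bump_eq (xs : List Int) (t : Int) :
    hasMeld (bwcBump (bwcCounter xs) t) = forms_meld (xs ++ [t]) := by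
  rw [bwcBump_eq]; exact (meld_eq (xs ++ [t])).symm

theorem acceptance_eq (xs : List Int) :
    acceptance_of_tiles xs = bwcAcceptance (bwcCounter xs) := by
  unfold acceptance_of_tiles bwcAcceptance
  apply PySem.List.foldl_congr_mem
  intro acc t _
  simp only [bwc_left_eq, meld_bump_eq]
  by_cases h1 : 0 < leftover_copies t xs <;>
    by_cases h2 : forms_meld (xs ++ [t]) = true <;>
      simp [h1, h2]


theorem acc_bump_eq (xs : List Int) (t : Int) :
    bwcAcceptance (bwcBump (bwcCounter xs) t) = acceptance_of_tiles (xs ++ [t]) := by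
  rw [bwcBump_eq, ← acceptance_eq]

-- ===== VERDICT (by name: the statement is the Claim_ definition above) =====
theorem better_wait_count_spec : Claim_equal_better_wait_count := by
  intro shape _
  show better_wait_count shape = better_wait_count_alt shape
  unfold better_wait_count better_wait_count_alt
  apply PySem.List.foldl_congr_mem
  intro acc t _
  simp only [bwc_left_eq, meld_bump_eq, acc_bump_eq, ← acceptance_eq]
  have hnn : 0 ≤ leftover_copies t shape := le_max_right _ _
  by_cases h0 : leftover_copies t shape = 0
  · simp [h0]
  · have h1 : 0 < leftover_copies t shape := lt_of_le_of_ne hnn (Ne.symm h0)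
    by_cases h2 : forms_meld (shape ++ [t]) = true <;>
      by_cases h3 : acceptance_of_tiles shape < acceptance_of_tiles (shape ++ [t]) <;>
        simp [h0, h1, h2, h3]
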